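-- pv_equiv track=rewrite | github.com/go-tiger/algorithm | 프로그래머스/0/181918. 배열 만들기 4/배열 만들기 4.py | solution
-- ===== SOURCE A (Python) =====
-- def solution(arr):
--     stk = []
--     i = 0
--     while i < len(arr):
--         if not stk or stk[-1] < arr[i]:
--             stk.append(arr[i])
--             i += 1
--         else:
--             stk.pop()
--     return stk
-- ===== SOURCE B (Python) =====
-- def solution(arr):
--     # Backward suffix-minimum scan: an element survives A's pop discipline
--     # exactly when it is strictly smaller than every element after it.
--     res = []
--     m = None
--     for x in reversed(arr):
--         if m is None or x < m:
--             res.append(x)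
--             m = x
--     res.reverse()
--     return res
-- ===== Notes on version B (the rewrite author's own statement) =====
-- stated objective: faster
-- what changed: Replaces the stack machine (push/pop with an index that advances only on push, up to 2n loop iterations with indexing) by a stackless single backward pass over reversed(arr) keeping a running suffix minimum: an element survives A's pops exactly when it is strictly smaller than every later element.
import Mathlib
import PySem

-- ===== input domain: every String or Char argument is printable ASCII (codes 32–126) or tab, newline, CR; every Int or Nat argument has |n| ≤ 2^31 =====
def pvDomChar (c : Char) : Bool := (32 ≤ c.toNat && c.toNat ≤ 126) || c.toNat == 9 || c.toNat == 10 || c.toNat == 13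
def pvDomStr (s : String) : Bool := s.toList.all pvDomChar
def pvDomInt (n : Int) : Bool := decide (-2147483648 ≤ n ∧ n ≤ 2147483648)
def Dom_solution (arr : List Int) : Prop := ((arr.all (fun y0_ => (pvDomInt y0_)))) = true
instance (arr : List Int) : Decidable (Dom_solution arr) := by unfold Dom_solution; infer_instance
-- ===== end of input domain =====

-- B drops A's stack machine entirely: one backward pass keeping a running suffix
-- minimum returns the same list (alternative algorithm, same asymptotic cost).

-- ===== PORT A =====
-- A's while loop: state (stk, i); the index i advances only on push.
-- stk[-1] exists exactly when stk ≠ [], read via getLastD under the guard,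
-- matching Python's short-circuit `not stk or stk[-1] < arr[i]`.
def solutionGo (arr : List Int) (stk : List Int) (i : Nat) : List Int :=
  if _h : i < arr.length then
    if hc : stk = [] ∨ stk.getLastD 0 < arr.getD i 0 then
      solutionGo arr (stk ++ [arr.getD i 0]) (i + 1)
    else
      solutionGo arr stk.dropLast i
  else stk
termination_by 2 * (arr.length - i) + stk.length
decreasing_by
  · simp; omega
  · have hne : stk ≠ [] := fun h => hc (Or.inl h)
    have : 0 < stk.length := List.length_pos_iff.mpr hne
    simp [List.length_dropLast]; omega

def solution (arr : List Int) : List Int := solutionGo arr [] 0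

-- ===== PORT B =====
-- Source B's loop over reversed(arr) with state (res, m); `m is None or x < m`
-- keeps x and updates m; finally res is reversed.
def solution_alt (arr : List Int) : List Int :=
  (arr.reverse.foldl
    (fun (st : List Int × Option Int) x =>
      match st.2 with
      | none => (st.1 ++ [x], some x)
      | some m => if x < m then (st.1 ++ [x], some x) else st)
    ([], none)).1.reverse

-- ===== PRECONDITION & SPEC =====
def Spec_solution (arr : List Int) (out : List Int) : Prop := out = solution_alt arr
instance (arr : List Int) (out : List Int) : Decidable (Spec_solution arr out) := by unfold Spec_solution; infer_instance

-- ===== CLAIM (what is proved, stated in full; the proofs are below) =====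
def Claim_equal_solution : Prop := ∀ (arr : List Int), Dom_solution arr → Spec_solution arr (solution arr)

-- ===== LEMMAS AND PROOFS =====

-- Common characterisation: keep x iff x is strictly below every later element.
def pvM : List Int → List Int
  | [] => []
  | x :: rest => if rest.all (fun y => decide (x < y)) then x :: pvM rest else pvM rest

-- pop-until-smaller on a top-first stack (proof-side description of A's pops)
def popGE (x : Int) : List Int → List Int
  | [] => []
  | t :: rest => if x ≤ t then popGE x rest else t :: rest

-- One element of A's processing: starting at index i < len, A pops until the top
-- is < arr[i] (popGE on the reversed stack) and then pushes arr[i].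
theorem solutionGo_step (arr : List Int) (stk : List Int) (i : Nat) (h : i < arr.length) :
    solutionGo arr stk i
      = solutionGo arr ((popGE (arr.getD i 0) stk.reverse).reverse ++ [arr.getD i 0]) (i + 1) := by
  induction stk using List.reverseRecOn with
  | nil => rw [solutionGo]; simp [h, popGE]
  | append_singleton ys t ih =>
      rw [solutionGo]
      simp only [h, dif_pos, List.getLastD_concat]
      have hrev : (ys ++ [t]).reverse = t :: ys.reverse := by simp
      by_cases ht : t < arr.getD i 0
      · rw [dif_pos (Or.inr ht)]
        have hpop : popGE (arr.getD i 0) (ys ++ [t]).reverse = (ys ++ [t]).reverse := by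
          rw [hrev, popGE, if_neg (not_le.mpr ht)]
        rw [hpop, List.reverse_reverse]
      · have hcond : ¬(ys ++ [t] = [] ∨ t < arr.getD i 0) := by
          rintro (h' | h')
          · simp at h'
          · exact ht h'
        rw [dif_neg hcond, List.dropLast_concat, ih]
        have hpop : popGE (arr.getD i 0) (ys ++ [t]).reverse = popGE (arr.getD i 0) ys.reverse := by
          rw [hrev, popGE, if_pos (not_lt.mp ht)]
        rw [hpop]

-- A's loop from index i equals a fold with popGE over the remaining elements.
theorem solutionGo_eq (arr : List Int) : ∀ (n : Nat) (stk : List Int) (i : Nat),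
    arr.length - i = n →
    solutionGo arr stk i
      = (List.foldl (fun s x => x :: popGE x s) stk.reverse (arr.drop i)).reverse := by
  intro n
  induction n with
  | zero =>
      intro stk i hn
      have hi : arr.length ≤ i := by omega
      rw [solutionGo]
      simp [Nat.not_lt.mpr hi, List.drop_eq_nil_of_le hi]
  | succ m ih =>
      intro stk i hn
      have hi : i < arr.length := by omega
      rw [solutionGo_step arr stk i hi]
      rw [ih _ (i + 1) (by omega)]
      have hdrop : arr.drop i = arr.getD i 0 :: arr.drop (i + 1) := by
        rw [List.drop_eq_getElem_cons hi]
        simp [List.getD, List.getElem?_eq_getElem hi]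
      rw [hdrop]
      simp

theorem mem_pvM {l : List Int} {y : Int} (h : y ∈ pvM l) : y ∈ l := by
  induction l with
  | nil => simpa [pvM] using h
  | cons x rest ih =>
      simp only [pvM] at h
      split at h
      · rcases List.mem_cons.mp h with h | h
        · simp [h]
        · exact List.mem_cons_of_mem _ (ih h)
      · exact List.mem_cons_of_mem _ (ih h)

theorem pairwise_pvM (l : List Int) : (pvM l).Pairwise (· < ·) := by
  induction l with
  | nil => simp [pvM]
  | cons x rest ih =>
      simp only [pvM]
      split
      · rename_i hall
        refine List.pairwise_cons.mpr ⟨fun y hy => ?_, ih⟩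
        have := List.all_eq_true.mp hall _ (mem_pvM hy)
        simpa using this
      · exact ih

theorem popGE_of_pairwise (x : Int) (s : List Int) (hs : s.Pairwise (· > ·)) :
    popGE x s = s.filter (fun y => decide (y < x)) := by
  induction s with
  | nil => rfl
  | cons t rest ih =>
      rcases List.pairwise_cons.mp hs with ⟨ht, hrest⟩
      by_cases hx : x ≤ t
      · rw [popGE, if_pos hx, ih hrest, List.filter_cons_of_neg (by simpa using not_lt.mpr hx)]
      · rw [popGE, if_neg hx, List.filter_cons_of_pos (by simpa using not_le.mp hx)]
        rw [List.filter_eq_self.mpr]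
        intro y hy
        have : y < t := ht y hy
        simp; omega

theorem pvM_append (l : List Int) (x : Int) :
    pvM (l ++ [x]) = (pvM l).filter (fun y => decide (y < x)) ++ [x] := by
  induction l with
  | nil => simp [pvM]
  | cons y l ih =>
      simp only [List.cons_append, pvM, List.all_append, ih]
      by_cases h1 : l.all (fun z => decide (y < z))
      · by_cases h2 : y < x
        · simp [h1, h2]
        · simp [h1, h2, List.filter_cons]
      · simp [h1]

-- A's fold builds exactly (pvM l).reverse.
theorem foldlA_eq (l : List Int) :
    List.foldl (fun s x => x :: popGE x s) [] l = (pvM l).reverse := by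
  induction l using List.reverseRecOn with
  | nil => simp [pvM]
  | append_singleton l x ih =>
      rw [List.foldl_append, ih, pvM_append]
      have hpw : ((pvM l).reverse).Pairwise (· > ·) := by
        rw [List.pairwise_reverse]
        exact pairwise_pvM l
      simp only [List.foldl_cons, List.foldl_nil]
      rw [popGE_of_pairwise _ _ hpw, List.filter_reverse]
      simp

-- B side: the running minimum of the already-processed suffix.
def pvMn : List Int → Option Int
  | [] => none
  | x :: rest => some (match pvMn rest with | none => x | some v => min x v)

theorem pvMn_spec (l : List Int) :
    match pvMn l with
    | none => l = []
    | some v => v ∈ l ∧ ∀ y ∈ l, v ≤ y := by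
  induction l with
  | nil => simp [pvMn]
  | cons x rest ih =>
      simp only [pvMn]
      cases h : pvMn rest with
      | none =>
          rw [h] at ih
          simp [ih]
      | some v =>
          rw [h] at ih
          rcases ih with ⟨hv, hb⟩
          constructor
          · rcases le_total x v with hxv | hxv
            · simp [min_eq_left hxv]
            · exact List.mem_cons_of_mem _ (by simpa [min_eq_right hxv] using hv)
          · intro y hy
            rcases List.mem_cons.mp hy with rfl | hy
            · exact min_le_left _ _
            · exact le_trans (min_le_right _ _) (hb y hy)

-- B's fold over l.reverse reaches exactly ((pvM l).reverse, pvMn l).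
theorem foldlB_eq (l : List Int) :
    List.foldl
      (fun (st : List Int × Option Int) x =>
        match st.2 with
        | none => (st.1 ++ [x], some x)
        | some m => if x < m then (st.1 ++ [x], some x) else st)
      ([], none) l.reverse = ((pvM l).reverse, pvMn l) := by
  induction l with
  | nil => simp [pvM, pvMn]
  | cons x rest ih =>
      have : (x :: rest).reverse = rest.reverse ++ [x] := by simp
      rw [this, List.foldl_append, ih]
      have hs := pvMn_spec rest
      simp only [List.foldl_cons, List.foldl_nil]
      cases h : pvMn rest with
      | none =>
          rw [h] at hs
          subst hs
          simp [pvM, pvMn]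
      | some v =>
          rw [h] at hs
          rcases hs with ⟨hv, hb⟩
          by_cases hx : x < v
          · have hall : rest.all (fun y => decide (x < y)) := by
              simp only [List.all_eq_true, decide_eq_true_eq]
              exact fun y hy => lt_of_lt_of_le hx (hb y hy)
            simp [hx, pvM, pvMn, hall, h, min_eq_left (le_of_lt hx)]
          · have hnall : ¬ rest.all (fun y => decide (x < y)) := by
              simp only [List.all_eq_true, decide_eq_true_eq]
              intro hall
              exact hx (hall v hv)
            simp [hx, pvM, pvMn, hnall, h, min_eq_right (not_lt.mp hx)]

-- ===== VERDICT (by name: the statement is the Claim_ definition above) =====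
theorem solution_spec : Claim_equal_solution := by
  intro arr _
  unfold Spec_solution solution solution_alt
  rw [solutionGo_eq arr (arr.length - 0) [] 0 rfl]
  simp only [List.reverse_nil, List.drop_zero]
  rw [foldlA_eq, foldlB_eq]
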